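-- pv_equiv track=rewrite | github.com/anirudhlakkaraju/code2code | translate/model/predict.py | process_python_output
-- ===== SOURCE A (Python) =====
-- def process_python_output(prediction):
--     lines = prediction.split("NEW_LINE")
--     curr_indent = 0
--     new_lines = []
--     for line in lines:
--         indent_count = line.count('INDENT')
--         dedent_count = line.count('DEDENT')
--         curr_indent += indent_count - dedent_count
--         new_lines.append('\t'*curr_indent + line.replace('INDENT', '').replace('DEDENT', ''))
--     return "\n".join(new_lines)
-- ===== SOURCE B (Python) =====
-- def process_python_output(prediction):
--     lines = prediction.split("NEW_LINE")
--     deltas = [line.count('INDENT') - line.count('DEDENT') for line in lines]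
--     levels = [sum(deltas[:i + 1]) for i in range(len(lines))]
--     new_lines = ['\t' * level + line.replace('INDENT', '').replace('DEDENT', '')
--                  for level, line in zip(levels, lines)]
--     return "\n".join(new_lines)
-- ===== Notes on version B (the rewrite author's own statement) =====
-- stated objective: alternative
-- what changed: Replaces the single running-accumulator loop by three separate stages: a per-line delta table, closed-form prefix sums over that table, and a zip of levels with lines.
import Mathlib
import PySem

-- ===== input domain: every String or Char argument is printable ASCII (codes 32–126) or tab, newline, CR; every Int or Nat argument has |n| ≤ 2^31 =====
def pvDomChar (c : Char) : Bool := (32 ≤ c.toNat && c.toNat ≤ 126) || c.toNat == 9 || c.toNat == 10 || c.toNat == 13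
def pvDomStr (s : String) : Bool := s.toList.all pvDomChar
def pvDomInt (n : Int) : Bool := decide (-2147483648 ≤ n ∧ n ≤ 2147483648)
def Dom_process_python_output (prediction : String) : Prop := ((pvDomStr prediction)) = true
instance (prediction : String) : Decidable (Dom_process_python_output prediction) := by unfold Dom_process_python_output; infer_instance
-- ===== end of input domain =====

-- B replaces A's single running-accumulator loop by three stages (delta table, prefix sums, zip); alternative decomposition, not faster.

-- ===== PORT A =====
def process_python_output (prediction : String) : String :=
  let lines := PySem.Chars.splitOn prediction.toList "NEW_LINE".toList
  let res := lines.foldl (fun (st : Int × List (List Char)) line =>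
      let indent_count : Int := PySem.Chars.count line "INDENT".toList
      let dedent_count : Int := PySem.Chars.count line "DEDENT".toList
      let curr := st.1 + (indent_count - dedent_count)
      (curr, st.2 ++ [PySem.List.pyRepeat ['\t'] curr ++
        PySem.Chars.replace (PySem.Chars.replace line "INDENT".toList []) "DEDENT".toList []]))
    (0, [])
  String.ofList (PySem.Chars.join "\n".toList res.2)

-- ===== PORT B =====
def process_python_output_alt (prediction : String) : String :=
  let lines := PySem.Chars.splitOn prediction.toList "NEW_LINE".toList
  let deltas : List Int := lines.map (fun line =>
    (PySem.Chars.count line "INDENT".toList : Int) - (PySem.Chars.count line "DEDENT".toList : Int))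
  let levels : List Int := (List.range lines.length).map (fun (i : Nat) =>
    (PySem.List.slice deltas none (some ((i : Int) + 1))).sum)
  let new_lines := (levels.zip lines).map (fun p =>
    PySem.List.pyRepeat ['\t'] p.1 ++
      PySem.Chars.replace (PySem.Chars.replace p.2 "INDENT".toList []) "DEDENT".toList [])
  String.ofList (PySem.Chars.join "\n".toList new_lines)

-- ===== PRECONDITION & SPEC =====
def Spec_process_python_output (prediction : String) (out : String) : Prop := out = process_python_output_alt prediction
instance (prediction : String) (out : String) : Decidable (Spec_process_python_output prediction out) := by unfold Spec_process_python_output; infer_instance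

-- ===== CLAIM (what is proved, stated in full; the proofs are below) =====
def Claim_equal_process_python_output : Prop := ∀ (prediction : String), Dom_process_python_output prediction → Spec_process_python_output prediction (process_python_output prediction)

-- ===== LEMMAS AND PROOFS =====


def pvDelta (line : List Char) : Int :=
  (PySem.Chars.count line "INDENT".toList : Int) - (PySem.Chars.count line "DEDENT".toList : Int)

def pvRender (c : Int) (line : List Char) : List Char :=
  PySem.List.pyRepeat ['\t'] c ++
    PySem.Chars.replace (PySem.Chars.replace line "INDENT".toList []) "DEDENT".toList []

lemma pv_fold_eq (lines : List (List Char)) : ∀ (c : Int) (acc : List (List Char)),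
    (lines.foldl (fun (st : Int × List (List Char)) line =>
      (st.1 + ((PySem.Chars.count line "INDENT".toList : Int) - (PySem.Chars.count line "DEDENT".toList : Int)),
       st.2 ++ [PySem.List.pyRepeat ['\t'] (st.1 + ((PySem.Chars.count line "INDENT".toList : Int) - (PySem.Chars.count line "DEDENT".toList : Int))) ++
         PySem.Chars.replace (PySem.Chars.replace line "INDENT".toList []) "DEDENT".toList []])) (c, acc)).2 =
    acc ++ (((List.range lines.length).map
        (fun i => c + ((lines.map pvDelta).take (i + 1)).sum)).zip lines).map
        (fun p => pvRender p.1 p.2) := by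
  induction lines with
  | nil => intro c acc; simp
  | cons l ls ih =>
    intro c acc
    have hmap : (List.range (ls.length + 1)).map
        (fun i => c + (((l :: ls).map pvDelta).take (i + 1)).sum)
        = (c + pvDelta l) ::
          (List.range ls.length).map (fun i => (c + pvDelta l) + ((ls.map pvDelta).take (i + 1)).sum) := by
      rw [List.range_succ_eq_map, List.map_cons, List.map_map]
      simp [Function.comp, List.take_succ_cons, add_assoc]
    rw [List.foldl_cons, ih, List.length_cons, hmap, List.zip_cons_cons, List.map_cons]
    simp [pvRender, pvDelta, List.append_assoc]

-- ===== VERDICT (by name: the statement is the Claim_ definition above) =====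
theorem process_python_output_spec : Claim_equal_process_python_output := by
  intro prediction _
  unfold Spec_process_python_output process_python_output process_python_output_alt
  simp only []
  congr 1
  rw [pv_fold_eq]
  simp only [List.nil_append, pvRender]
  congr 3
  apply List.map_congr_left
  intro i hi
  have hcast : ((i : Int) + 1) = (((i + 1 : Nat)) : Int) := by push_cast; ring
  rw [hcast, PySem.List.slice_to_natCast]
  rw [zero_add]; rfl
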